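-- pv_equiv track=rewrite | github.com/JeongHunHui/coding-test-practice | 프로그래머스/2/17677. ［1차］ 뉴스 클러스터링/［1차］ 뉴스 클러스터링.py | strToCounter
-- ===== SOURCE A (Python) =====
-- from collections import Counter
--
-- def strToCounter(s):
--     temp, answer = '', []
--     for c in s:
--         if not c.isalpha():
--             temp = ''
--             continue
--         temp += c.lower()
--         if len(temp) == 2:
--             answer.append(temp)
--             temp = temp[1:]
--     return Counter(answer)
-- ===== SOURCE B (Python) =====
-- from collections import Counter
--
-- def strToCounter(s):
--     return Counter(
--         a.lower() + b.lower()
--         for a, b in zip(s, s[1:])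
--         if a.isalpha() and b.isalpha()
--     )
-- ===== Notes on version B (the rewrite author's own statement) =====
-- stated objective: simpler
-- what changed: Replaced the running-buffer state machine (temp accumulator with reset/shift logic) by a direct scan of adjacent character pairs via zip(s, s[1:]), keeping a pair exactly when both characters are alphabetic.
import Mathlib
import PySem

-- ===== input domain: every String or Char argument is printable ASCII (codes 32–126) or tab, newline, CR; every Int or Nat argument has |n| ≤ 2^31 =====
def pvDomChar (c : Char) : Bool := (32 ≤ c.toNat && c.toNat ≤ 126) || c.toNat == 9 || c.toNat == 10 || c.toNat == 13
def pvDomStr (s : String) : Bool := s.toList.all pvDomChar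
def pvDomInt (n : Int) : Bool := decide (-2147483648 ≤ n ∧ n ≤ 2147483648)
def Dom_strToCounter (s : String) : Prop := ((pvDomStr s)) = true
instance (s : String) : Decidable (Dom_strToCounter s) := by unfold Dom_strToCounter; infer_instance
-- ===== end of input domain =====

-- B replaces A's running-buffer state machine by a direct zip(s, s[1:]) pair scan (simpler decomposition, same cost).


-- ===== PORT A =====
-- one loop iteration of A: state = (temp as List Char, answer); branches in A's order
def pvStepA (st : List Char × List String) (c : Char) : List Char × List String :=
  if !(PySem.Chars.isalpha c) then ([], st.2)
  else
    let temp := st.1 ++ [PySem.Chars.lowerChar c]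
    if temp.length == 2 then (temp.drop 1, st.2 ++ [String.mk temp])
    else (temp, st.2)

def strToCounter (s : String) : List (String × Int) :=
  let st := s.toList.foldl pvStepA ([], [])
  (PySem.Dict.counter st.2).items

-- ===== PORT B =====
def strToCounter_alt (s : String) : List (String × Int) :=
  let l := s.toList
  let grams := (l.zip l.tail).filterMap (fun p =>
    if PySem.Chars.isalpha p.1 && PySem.Chars.isalpha p.2
    then some (String.mk [PySem.Chars.lowerChar p.1, PySem.Chars.lowerChar p.2])
    else none)
  (PySem.Dict.counter grams).items

-- ===== PRECONDITION & SPEC =====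
def Spec_strToCounter (s : String) (out : List (String × Int)) : Prop := out = strToCounter_alt s
instance (s : String) (out : List (String × Int)) : Decidable (Spec_strToCounter s out) := by unfold Spec_strToCounter; infer_instance

-- ===== CLAIM (what is proved, stated in full; the proofs are below) =====
def Claim_equal_strToCounter : Prop := ∀ (s : String), Dom_strToCounter s → Spec_strToCounter s (strToCounter s)

-- ===== LEMMAS AND PROOFS =====

-- common description of the emitted bigram list: p is the lowered previous char if it was alphabetic
def pvBg : Option Char → List Char → List String
  | _, [] => []
  | p, c :: l =>
    if PySem.Chars.isalpha c then
      (match p with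
       | some t => [String.mk [t, PySem.Chars.lowerChar c]]
       | none => []) ++ pvBg (some (PySem.Chars.lowerChar c)) l
    else pvBg none l

def pvStateOf : Option Char → List Char
  | none => []
  | some t => [t]

theorem pvFoldA_eq_bg (l : List Char) : ∀ (p : Option Char) (ans : List String),
    (l.foldl pvStepA (pvStateOf p, ans)).2 = ans ++ pvBg p l := by
  induction l with
  | nil => intro p ans; simp [pvBg]
  | cons c l ih =>
    intro p ans
    simp only [List.foldl_cons, pvBg]
    by_cases h : PySem.Chars.isalpha c
    · cases p with
      | none =>
        have : pvStepA (pvStateOf none, ans) c = (pvStateOf (some (PySem.Chars.lowerChar c)), ans) := by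
          simp [pvStepA, pvStateOf, h]
        rw [this, ih]
        simp [h]
      | some t =>
        have : pvStepA (pvStateOf (some t), ans) c =
            (pvStateOf (some (PySem.Chars.lowerChar c)), ans ++ [String.mk [t, PySem.Chars.lowerChar c]]) := by
          simp [pvStepA, pvStateOf, h]
        rw [this, ih]
        simp [h]
    · have : pvStepA (pvStateOf p, ans) c = (pvStateOf none, ans) := by
        simp [pvStepA, pvStateOf, h]
      rw [this, ih]
      simp [h]

def pvF (p : Char × Char) : Option String :=
  if PySem.Chars.isalpha p.1 && PySem.Chars.isalpha p.2
  then some (String.mk [PySem.Chars.lowerChar p.1, PySem.Chars.lowerChar p.2])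
  else none

theorem pvPairs_eq_bg (l : List Char) : ∀ (a : Char),
    (((a :: l).zip (a :: l).tail).filterMap pvF) =
      pvBg (if PySem.Chars.isalpha a then some (PySem.Chars.lowerChar a) else none) l := by
  induction l with
  | nil => intro a; simp [pvBg]
  | cons b l ih =>
    intro a
    have : ((a :: b :: l).zip (a :: b :: l).tail) = (a, b) :: ((b :: l).zip (b :: l).tail) := by
      simp
    rw [this, List.filterMap_cons, ih b]
    by_cases ha : PySem.Chars.isalpha a <;> by_cases hb : PySem.Chars.isalpha b <;>
      simp [pvF, pvBg, ha, hb]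

theorem pvLists_eq (l : List Char) :
    (l.foldl pvStepA ([], [])).2 = (l.zip l.tail).filterMap pvF := by
  cases l with
  | nil => simp
  | cons a l =>
    have h1 := pvFoldA_eq_bg (a :: l) none []
    simp only [pvStateOf] at h1
    rw [h1, pvPairs_eq_bg l a]
    simp only [pvBg]
    by_cases ha : PySem.Chars.isalpha a <;> simp [ha]

-- ===== VERDICT (by name: the statement is the Claim_ definition above) =====
theorem strToCounter_spec : Claim_equal_strToCounter := by
  intro s _
  unfold Spec_strToCounter strToCounter strToCounter_alt
  simp only []
  rw [pvLists_eq s.toList]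
  rfl
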